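-- pv_equiv track=rewrite | github.com/the-lupaxa-project/workflows | .github/scripts/send-to-slack.py | determine_workflow_color_and_msg
-- ===== SOURCE A (Python) =====
-- from typing import Any, Dict, List, NoReturn, Optional, Tuple, Set
--
-- def determine_workflow_color_and_msg(completed_jobs: List[Dict[str, Any]]) -> Tuple[str, str]:
--     """
--     Determine the Slack colour and lead message for the workflow.
--
--     The decision mirrors the logic in Gamesight/slack-workflow-status:
--
--       - If **all** completed jobs have a conclusion in ``{"success", "skipped"}``,
--         use colour ``"good"`` and lead message ``"Success:"``.
--       - Else if **any** completed job has a conclusion of ``"cancelled"``,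
--         use colour ``"warning"`` and lead message ``"Cancelled:"``.
--       - Otherwise, treat the workflow as failed: colour ``"danger"``,
--         lead message ``"Failed:"``.
--
--     If there are no completed jobs at all, the function returns
--     ``("warning", "Unknown:")``.
--
--     Args:
--         completed_jobs:
--             List of job dictionaries (typically filtered to status
--             ``"completed"``).
--
--     Returns:
--         A 2-tuple ``(workflow_color, workflow_msg)`` suitable for use in
--         Slack attachments, e.g. ``("good", "Success:")``.
--     """
--     if not completed_jobs:
--         return "warning", "Unknown:"
--
--     conclusions = [str(job.get("conclusion") or "").lower() for job in completed_jobs]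
--
--     if all(c in ("success", "skipped") for c in conclusions):
--         return "good", "Success:"
--
--     if any(c == "cancelled" for c in conclusions):
--         return "warning", "Cancelled:"
--
--     return "danger", "Failed:"
-- ===== SOURCE B (Python) =====
-- _RESULT_BY_SEVERITY = [("good", "Success:"), ("danger", "Failed:"), ("warning", "Cancelled:")]
--
--
-- def _severity(job):
--     c = str(job.get("conclusion") or "").lower()
--     if c in ("success", "skipped"):
--         return 0
--     if c == "cancelled":
--         return 2
--     return 1
--
--
-- def determine_workflow_color_and_msg(completed_jobs):
--     if not completed_jobs:
--         return "warning", "Unknown:"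
--     return _RESULT_BY_SEVERITY[max(map(_severity, completed_jobs))]
-- ===== Notes on version B (the rewrite author's own statement) =====
-- stated objective: alternative
-- what changed: Replaces A's all/any boolean scans by mapping each job to a numeric severity (success/skipped=0, failed=1, cancelled=2) and indexing a result table by the maximum severity.
import Mathlib
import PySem

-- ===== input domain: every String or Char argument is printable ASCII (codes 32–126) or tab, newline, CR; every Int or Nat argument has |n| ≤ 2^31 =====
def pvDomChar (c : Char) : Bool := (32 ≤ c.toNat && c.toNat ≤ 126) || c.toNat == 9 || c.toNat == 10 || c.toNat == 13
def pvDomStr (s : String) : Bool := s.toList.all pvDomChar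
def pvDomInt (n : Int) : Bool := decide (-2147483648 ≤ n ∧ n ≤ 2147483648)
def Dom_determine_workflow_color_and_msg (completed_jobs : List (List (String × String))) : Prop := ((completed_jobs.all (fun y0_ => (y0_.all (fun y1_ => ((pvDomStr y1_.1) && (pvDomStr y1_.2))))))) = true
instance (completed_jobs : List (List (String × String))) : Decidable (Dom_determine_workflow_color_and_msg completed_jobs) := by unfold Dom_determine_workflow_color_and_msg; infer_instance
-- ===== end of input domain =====

-- B replaces A's all/any boolean scans by a numeric severity per job (success/skipped=0, failed=1, cancelled=2) and a result table indexed by the maximum severity (alternative algorithm, same cost).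


-- ===== PORT A =====
-- str(job.get("conclusion") or "").lower(): get? returns none when the key is missing; a present "" is falsy and also yields "" — so getD "" is exact for str values.
def pvConcl (job : List (String × String)) : String :=
  PySem.Str.lower (((PySem.Dict.mk job).get? "conclusion").getD "")

def determine_workflow_color_and_msg (completed_jobs : List (List (String × String))) : String × String :=
  if completed_jobs = [] then ("warning", "Unknown:")
  else
    let conclusions := completed_jobs.map (fun job => pvConcl job)
    if conclusions.all (fun c => c == "success" || c == "skipped") then ("good", "Success:")
    else if conclusions.any (fun c => c == "cancelled") then ("warning", "Cancelled:")
    else ("danger", "Failed:")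

-- ===== PORT B =====
def pvResultBySeverity : List (String × String) :=
  [("good", "Success:"), ("danger", "Failed:"), ("warning", "Cancelled:")]

def pvSeverity (job : List (String × String)) : Nat :=
  if pvConcl job == "success" || pvConcl job == "skipped" then 0
  else if pvConcl job == "cancelled" then 2
  else 1

def determine_workflow_color_and_msg_alt (completed_jobs : List (List (String × String))) : String × String :=
  if completed_jobs = [] then ("warning", "Unknown:")
  else
    -- Python's max over the nonempty map; folding from 0 is exact since severities are ≥ 0.
    let rank := (completed_jobs.map pvSeverity).foldl Nat.max 0
    -- table[rank]: rank ≤ 2 always, so the lookup succeeds; getD only makes the indexing total.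
    (PySem.List.pyGet? pvResultBySeverity (rank : Int)).getD ("danger", "Failed:")

-- ===== PRECONDITION & SPEC =====
def Spec_determine_workflow_color_and_msg (completed_jobs : List (List (String × String))) (out : String × String) : Prop := out = determine_workflow_color_and_msg_alt completed_jobs
instance (completed_jobs : List (List (String × String))) (out : String × String) : Decidable (Spec_determine_workflow_color_and_msg completed_jobs out) := by unfold Spec_determine_workflow_color_and_msg; infer_instance

-- ===== CLAIM (what is proved, stated in full; the proofs are below) =====
def Claim_equal_determine_workflow_color_and_msg : Prop := ∀ (completed_jobs : List (List (String × String))), Dom_determine_workflow_color_and_msg completed_jobs → Spec_determine_workflow_color_and_msg completed_jobs (determine_workflow_color_and_msg completed_jobs)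

-- ===== LEMMAS AND PROOFS =====

lemma pvSeverity_le (job : List (String × String)) : pvSeverity job ≤ 2 := by
  unfold pvSeverity
  split
  · omega
  · split <;> omega

lemma pvSeverity_eq_zero (job : List (String × String)) :
    pvSeverity job = 0 ↔ (pvConcl job == "success" || pvConcl job == "skipped") = true := by
  unfold pvSeverity pvConcl
  split_ifs with h1 h2 <;> simp_all

lemma pvSeverity_eq_two (job : List (String × String)) :
    pvSeverity job = 2 ↔ (pvConcl job == "cancelled") = true := by
  unfold pvSeverity pvConcl
  split_ifs with h1 h2
  · constructor
    · intro h; exact absurd h (by decide)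
    · intro hc
      rw [beq_iff_eq] at hc
      rw [hc] at h1
      exact absurd h1 (by decide)
  · simp [h2]
  · simp [h2]

lemma max_eq_zero_iff' (a x : Nat) : Nat.max a x = 0 ↔ a = 0 ∧ x = 0 := by
  have hmx : Nat.max a x = if a ≤ x then x else a := by
    rw [show Nat.max a x = max a x from rfl, Nat.max_def]
  rw [hmx]; split <;> omega

lemma max_eq_two_iff' (a x : Nat) (ha : a ≤ 2) (hx : x ≤ 2) :
    Nat.max a x = 2 ↔ a = 2 ∨ x = 2 := by
  have hmx : Nat.max a x = if a ≤ x then x else a := by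
    rw [show Nat.max a x = max a x from rfl, Nat.max_def]
  rw [hmx]; split <;> omega

lemma max_le_two (a x : Nat) (ha : a ≤ 2) (hx : x ≤ 2) : Nat.max a x ≤ 2 := by
  have hmx : Nat.max a x = if a ≤ x then x else a := by
    rw [show Nat.max a x = max a x from rfl, Nat.max_def]
  rw [hmx]; split <;> omega

lemma foldl_max_le (l : List Nat) (a : Nat) (ha : a ≤ 2) (hl : ∀ x ∈ l, x ≤ 2) :
    l.foldl Nat.max a ≤ 2 := by
  induction l generalizing a with
  | nil => simpa
  | cons x t ih =>
      simp only [List.foldl_cons]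
      exact ih _ (max_le_two a x ha (hl x (by simp))) (fun y hy => hl y (by simp [hy]))

lemma foldl_max_eq_zero (l : List Nat) (a : Nat) :
    l.foldl Nat.max a = 0 ↔ a = 0 ∧ ∀ x ∈ l, x = 0 := by
  induction l generalizing a with
  | nil => simp
  | cons x t ih =>
      simp only [List.foldl_cons, ih, List.mem_cons, max_eq_zero_iff']
      constructor
      · rintro ⟨⟨ha, hx⟩, h2⟩
        refine ⟨ha, ?_⟩
        rintro y (rfl | hy)
        · exact hx
        · exact h2 y hy
      · rintro ⟨ha, h⟩
        exact ⟨⟨ha, h x (Or.inl rfl)⟩, fun y hy => h y (Or.inr hy)⟩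

lemma foldl_max_eq_two (l : List Nat) (a : Nat) (ha : a ≤ 2) (hl : ∀ x ∈ l, x ≤ 2) :
    l.foldl Nat.max a = 2 ↔ a = 2 ∨ ∃ x ∈ l, x = 2 := by
  induction l generalizing a with
  | nil => simp
  | cons x t ih =>
      have hx : x ≤ 2 := hl x (by simp)
      simp only [List.foldl_cons,
        ih (Nat.max a x) (max_le_two a x ha hx) (fun y hy => hl y (by simp [hy])),
        List.mem_cons, max_eq_two_iff' a x ha hx]
      constructor
      · rintro ((h | h) | ⟨y, hy, hy2⟩)
        · exact Or.inl h
        · exact Or.inr ⟨x, Or.inl rfl, h⟩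
        · exact Or.inr ⟨y, Or.inr hy, hy2⟩
      · rintro (h | ⟨y, (rfl | hy), hy2⟩)
        · exact Or.inl (Or.inl h)
        · exact Or.inl (Or.inr hy2)
        · exact Or.inr ⟨y, hy, hy2⟩

-- ===== VERDICT (by name: the statement is the Claim_ definition above) =====
theorem determine_workflow_color_and_msg_spec : Claim_equal_determine_workflow_color_and_msg := by
  intro jobs _
  unfold Spec_determine_workflow_color_and_msg determine_workflow_color_and_msg
    determine_workflow_color_and_msg_alt
  by_cases hnil : jobs = []
  · simp [hnil]
  · simp only [hnil, if_false]
    have hle : ∀ x ∈ jobs.map pvSeverity, x ≤ 2 := by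
      intro x hx
      obtain ⟨j, _, rfl⟩ := List.mem_map.mp hx
      exact pvSeverity_le j
    have hbound := foldl_max_le (jobs.map pvSeverity) 0 (by omega) hle
    have hzero := foldl_max_eq_zero (jobs.map pvSeverity) 0
    have htwo := foldl_max_eq_two (jobs.map pvSeverity) 0 (by omega) hle
    set r := (jobs.map pvSeverity).foldl Nat.max 0 with hr
    by_cases hall : (jobs.map (fun job => pvConcl job)).all (fun c => c == "success" || c == "skipped") = true
    · -- all good: every severity is 0, so r = 0
      have : r = 0 := by
        rw [hzero]
        refine ⟨rfl, ?_⟩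
        intro x hx
        obtain ⟨j, hj, rfl⟩ := List.mem_map.mp hx
        exact (pvSeverity_eq_zero j).mpr (by simpa using List.all_eq_true.mp hall _ (List.mem_map.mpr ⟨j, hj, rfl⟩))
      simp [hall, this, PySem.List.pyGet?, PySem.List.pyIdx?, pvResultBySeverity]
    · have hrne0 : r ≠ 0 := by
        intro h0
        apply hall
        rw [List.all_eq_true]
        intro c hc
        obtain ⟨j, hj, rfl⟩ := List.mem_map.mp hc
        exact (pvSeverity_eq_zero j).mp ((hzero.mp h0).2 _ (List.mem_map.mpr ⟨j, hj, rfl⟩))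
      by_cases hany : (jobs.map (fun job => pvConcl job)).any (fun c => c == "cancelled") = true
      · -- some cancelled: r = 2
        have : r = 2 := by
          rw [htwo]
          obtain ⟨c, hc, hcv⟩ := List.any_eq_true.mp hany
          obtain ⟨j, hj, rfl⟩ := List.mem_map.mp hc
          exact Or.inr ⟨pvSeverity j, List.mem_map.mpr ⟨j, hj, rfl⟩, (pvSeverity_eq_two j).mpr hcv⟩
        simp [hall, hany, this, PySem.List.pyGet?, PySem.List.pyIdx?, pvResultBySeverity]
      · -- no cancelled and not all good: r = 1
        have hrne2 : r ≠ 2 := by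
          intro h2
          rcases htwo.mp h2 with h | ⟨x, hx, hx2⟩
          · omega
          · obtain ⟨j, hj, rfl⟩ := List.mem_map.mp hx
            apply hany
            rw [List.any_eq_true]
            exact ⟨pvConcl j, List.mem_map.mpr ⟨j, hj, rfl⟩, (pvSeverity_eq_two j).mp hx2⟩
        have : r = 1 := by omega
        simp [hall, hany, this, PySem.List.pyGet?, PySem.List.pyIdx?, pvResultBySeverity]
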